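-- pv_equiv track=rewrite | github.com/cbtaylor/CPSC189 | Lecture01-04/lecture_01c_2.py | words_starting_with_vowel
-- ===== SOURCE A (Python) =====
-- def words_starting_with_vowel(low):
--     """
--     (listof Word) -> (listof Word)
--
--     Produces a list of words in low that start with a vowel
--
--     >>> words_starting_with_vowel([])
--     []
--
--     >>> words_starting_with_vowel(['abcde'])
--     ['abcde']
--
--     >>> words_starting_with_vowel(['bcdef'])
--     []
--
--     >>> words_starting_with_vowel(['abc', 'def', 'efg', 'fgh'])
--     ['abc', 'efg']
--     """
-- #    return []                                           <--- STUB
-- #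
-- #    if low == []:                                       <--- TEMPLATE
-- #        return ...
-- #    else:
-- #        return ...fn_for_word(low[0]) ...words_starting_with_vowel(low[1:])
-- #                  ^^^^^^ note the call to this helper - why is it there???
--
--     if low == []:
--         return []
--     else:
--         if starts_with_vowel(low[0]):
--             return [low[0]] + words_starting_with_vowel(low[1:])
--         else:
--             return words_starting_with_vowel(low[1:])
--
-- def starts_with_vowel(w):
--     """
--     Word -> bool
--
--     Determine if w starts with a vowel
--
--     >>> starts_with_vowel('abc')
--     True
--
--     >>> starts_with_vowel('efg')
--     True
--
--     >>> starts_with_vowel('ijk')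
--     True
--
--     >>> starts_with_vowel('opq')
--     True
--
--     >>> starts_with_vowel('uvw')
--     True
--
--     >>> starts_with_vowel('xyz')
--     False
--     """
--     #return False                                        #<--- STUB
--     #return ...w                                         #<--- TEMPLATE
--     return w[0] == 'a' or w[0] == 'e' or w[0] == 'i' \
--            or w[0] == 'o' or w[0] == 'u'
-- ===== SOURCE B (Python) =====
-- def words_starting_with_vowel(low):
--     result = []
--     for w in low:
--         if w[0] in 'aeiou':
--             result.append(w)
--     return result
-- ===== Notes on version B (the rewrite author's own statement) =====
-- stated objective: faster
-- what changed: Replaced the head/tail structural recursion (rebuilding the list with [head] + rec(rest)) by a single iterative forward pass appending matching words to an accumulator list.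
import Mathlib
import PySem

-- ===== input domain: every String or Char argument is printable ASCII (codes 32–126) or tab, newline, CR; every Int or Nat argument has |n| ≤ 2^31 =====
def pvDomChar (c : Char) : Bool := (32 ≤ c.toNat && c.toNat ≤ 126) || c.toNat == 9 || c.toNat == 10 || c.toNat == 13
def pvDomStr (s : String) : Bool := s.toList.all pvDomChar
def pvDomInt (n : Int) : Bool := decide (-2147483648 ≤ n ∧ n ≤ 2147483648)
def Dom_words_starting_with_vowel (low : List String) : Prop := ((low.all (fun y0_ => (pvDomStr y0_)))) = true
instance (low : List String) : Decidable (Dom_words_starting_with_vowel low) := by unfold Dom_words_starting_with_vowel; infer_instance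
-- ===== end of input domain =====

-- B replaces A's head/tail structural recursion by a single iterative accumulator pass (objective: simpler).


-- ===== PORT A =====
-- helper starts_with_vowel: w[0] == 'a' or … ; w[0] raises IndexError on "" (excluded by Pre_),
-- the port reads the head via PySem.Str.pyGet? and returns false in the none case (unreachable inside Pre_).
def startsWithVowelA (w : String) : Bool :=
  match PySem.Str.pyGet? w 0 with
  | some c => c == 'a' || c == 'e' || c == 'i' || c == 'o' || c == 'u'
  | none => false

def words_starting_with_vowel (low : List String) : List String :=
  match low with
  | [] => []
  | w :: rest =>
    if startsWithVowelA w then [w] ++ words_starting_with_vowel rest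
    else words_starting_with_vowel rest

-- ===== PORT B =====
-- helper for `w[0] in 'aeiou'`
def headIsVowelB (w : String) : Bool :=
  match PySem.Str.pyGet? w 0 with
  | some c => "aeiou".toList.contains c  -- `c in 'aeiou'`
  | none => false

-- iterative accumulator loop: for w in low: if vowel then result.append(w)
def words_starting_with_vowel_alt (low : List String) : List String :=
  low.foldl (fun result w => if headIsVowelB w then result ++ [w] else result) []

-- ===== PRECONDITION & SPEC =====
-- Pre_ excludes lists containing an empty word, on which Python A raises IndexError at w[0].
def Pre_words_starting_with_vowel (low : List String) : Prop := ∀ w ∈ low, w ≠ ""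
instance (low : List String) : Decidable (Pre_words_starting_with_vowel low) := by unfold Pre_words_starting_with_vowel; infer_instance
def pvWitness_words_starting_with_vowel : List String := ["abc", "def", "efg", "fgh"]

def Spec_words_starting_with_vowel (low : List String) (out : List String) : Prop := out = words_starting_with_vowel_alt low
instance (low : List String) (out : List String) : Decidable (Spec_words_starting_with_vowel low out) := by unfold Spec_words_starting_with_vowel; infer_instance

-- ===== CLAIM =====
def Claim_equal_words_starting_with_vowel : Prop := ∀ (low : List String), Dom_words_starting_with_vowel low → Pre_words_starting_with_vowel low → Spec_words_starting_with_vowel low (words_starting_with_vowel low)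

-- ===== LEMMAS AND PROOFS =====
theorem vowel_agree : headIsVowelB = startsWithVowelA := by
  funext w
  unfold headIsVowelB startsWithVowelA
  cases PySem.Str.pyGet? w 0 with
  | none => rfl
  | some c => simp [List.contains_cons, Bool.or_assoc, beq_eq_decide]

theorem foldl_acc (low : List String) (acc : List String) :
    low.foldl (fun result w => if startsWithVowelA w then result ++ [w] else result) acc
      = acc ++ words_starting_with_vowel low := by
  induction low generalizing acc with
  | nil => simp [words_starting_with_vowel]
  | cons w rest ih =>
    simp only [List.foldl, words_starting_with_vowel]
    by_cases h : startsWithVowelA w <;> simp [h, ih]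

-- ===== VERDICT =====
theorem words_starting_with_vowel_spec : Claim_equal_words_starting_with_vowel := by
  intro low _ _
  unfold Spec_words_starting_with_vowel words_starting_with_vowel_alt
  rw [vowel_agree, foldl_acc]
  simp
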